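-- pv_equiv track=rewrite | github.com/VishantMehta/Adobe_project | Round 1B/extraction.py | rank_sections
-- ===== SOURCE A (Python) =====
-- def rank_sections(sections, job_keywords):
--     ranked = []
--     seen_titles = set()
--     for sec in sections:
--         score = sum(1 for kw in job_keywords if kw.lower() in sec["section_title"].lower())
--         if sec["section_title"] not in seen_titles:
--             ranked.append((score, sec))
--             seen_titles.add(sec["section_title"])
--     ranked.sort(reverse=True, key=lambda x: x[0])
--     return [item[1] for item in ranked if item[0] > 0][:5]
-- ===== SOURCE B (Python) =====
-- def rank_sections(sections, job_keywords):
--     kws = [kw.lower() for kw in job_keywords]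
--     buckets = [[] for _ in range(len(kws) + 1)]
--     seen = set()
--     for sec in sections:
--         title = sec["section_title"]
--         if title in seen:
--             continue
--         seen.add(title)
--         t = title.lower()
--         buckets[sum(1 for kw in kws if kw in t)].append(sec)
--     out = []
--     for score in range(len(kws), 0, -1):
--         out.extend(buckets[score])
--     return out[:5]
-- ===== Notes on version B (the rewrite author's own statement) =====
-- stated objective: alternative
-- what changed: B replaces A's dedupe-then-stable-reverse-sort(+filter) by a counting sort: one pass drops already-seen titles and appends each section into a score bucket (scores 0..len(job_keywords), keywords lowered once), then the buckets are read out from the highest score down to 1 and the first five are returned.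
import Mathlib
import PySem

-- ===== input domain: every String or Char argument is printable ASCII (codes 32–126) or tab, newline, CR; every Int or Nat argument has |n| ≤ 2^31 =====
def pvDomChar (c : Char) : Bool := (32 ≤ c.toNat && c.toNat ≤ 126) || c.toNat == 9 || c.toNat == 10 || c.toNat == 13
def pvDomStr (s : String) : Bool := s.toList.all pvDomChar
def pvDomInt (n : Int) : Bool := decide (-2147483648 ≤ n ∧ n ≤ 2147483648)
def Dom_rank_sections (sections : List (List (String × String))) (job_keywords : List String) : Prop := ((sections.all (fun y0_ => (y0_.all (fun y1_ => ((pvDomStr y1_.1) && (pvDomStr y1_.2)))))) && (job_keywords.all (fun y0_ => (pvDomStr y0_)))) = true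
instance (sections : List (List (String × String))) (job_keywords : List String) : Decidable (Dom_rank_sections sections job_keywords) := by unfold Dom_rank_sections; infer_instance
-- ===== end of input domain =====

-- B replaces A's dedupe-then-stable-reverse-sort-then-filter by a single bucket pass (a counting
-- sort over the scores 0..len(job_keywords)) read out high-to-low, with the keywords lowered once.

-- ===== PORT A =====
-- one iteration of A's 'for sec in sections' loop, carrying (ranked, seen_titles)
def stepA (job_keywords : List String) (st : List (Int × List (String × String)) × PySem.Set String)
    (sec : List (String × String)) : List (Int × List (String × String)) × PySem.Set String :=
  let title := (PySem.Dict.get? ⟨sec⟩ "section_title").getD ""   -- sec["section_title"]; exact under Pre_ (key present)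
  let score : Int := job_keywords.foldl
    (fun s kw => if PySem.Str.isIn (PySem.Str.lower kw) (PySem.Str.lower title) then s + 1 else s) 0
  if PySem.Set.contains st.2 title then st
  else (st.1 ++ [(score, sec)], PySem.Set.add st.2 title)

def rank_sections (sections : List (List (String × String))) (job_keywords : List String) :
    List (List (String × String)) :=
  let st := sections.foldl (stepA job_keywords) ([], PySem.Set.empty)
  let ranked := PySem.List.sorted st.1 (fun x => x.1) true
  PySem.List.slice ((ranked.filter (fun item => decide (0 < item.1))).map (fun item => item.2)) none (some 5)

-- ===== PORT B =====
-- one iteration of B's bucket-filling loop, carrying (buckets, seen); kws is the pre-lowered keyword list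
def stepB (kws : List String) (st : List (List (List (String × String))) × PySem.Set String)
    (sec : List (String × String)) : List (List (List (String × String))) × PySem.Set String :=
  let title := (PySem.Dict.get? ⟨sec⟩ "section_title").getD ""   -- sec["section_title"]; exact under Pre_ (key present)
  if PySem.Set.contains st.2 title then st
  else
    let t := PySem.Str.lower title
    let n : Nat := kws.foldl (fun n kw => if PySem.Str.isIn kw t then n + 1 else n) 0
    (st.1.set n (st.1.getD n [] ++ [sec]), PySem.Set.add st.2 title)

def rank_sections_alt (sections : List (List (String × String))) (job_keywords : List String) :
    List (List (String × String)) :=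
  let kws := job_keywords.map PySem.Str.lower
  let st := sections.foldl (stepB kws) (List.replicate (kws.length + 1) [], PySem.Set.empty)
  let out := (PySem.List.pyRange kws.length 0 (-1)).foldl (fun out v => out ++ st.1.getD v.toNat []) []
  PySem.List.slice out none (some 5)

-- ===== PRECONDITION & SPEC =====
-- Pre_ excludes exactly the inputs where some section dict lacks the key "section_title":
-- there the Python A raises KeyError (and B raises too).
def Pre_rank_sections (sections : List (List (String × String))) (job_keywords : List String) : Prop :=
  (sections.all (fun sec => (PySem.Dict.get? (⟨sec⟩ : PySem.Dict String String) "section_title").isSome)) = true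
instance (sections : List (List (String × String))) (job_keywords : List String) : Decidable (Pre_rank_sections sections job_keywords) := by unfold Pre_rank_sections; infer_instance

def pvWitness_rank_sections : (List (List (String × String))) × List String :=
  ([[("section_title", "Plan a Cooking Trip")], [("section_title", "Intro")]], ["cook", "trip"])

def Spec_rank_sections (sections : List (List (String × String))) (job_keywords : List String) (out : List (List (String × String))) : Prop := out = rank_sections_alt sections job_keywords
instance (sections : List (List (String × String))) (job_keywords : List String) (out : List (List (String × String))) : Decidable (Spec_rank_sections sections job_keywords out) := by unfold Spec_rank_sections; infer_instance

-- ===== CLAIM (what is proved, stated in full; the proofs are below) =====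
def Claim_equal_rank_sections : Prop := ∀ (sections : List (List (String × String))) (job_keywords : List String), Dom_rank_sections sections job_keywords → Pre_rank_sections sections job_keywords → Spec_rank_sections sections job_keywords (rank_sections sections job_keywords)

-- ===== LEMMAS AND PROOFS =====

-- a Nat-counting loop is countP
theorem foldl_count_nat {α : Type} (p : α → Bool) (l : List α) (n : Nat) :
    l.foldl (fun n x => if p x then n + 1 else n) n = n + l.countP p := by
  induction l generalizing n with
  | nil => simp
  | cons x xs ih => by_cases h : p x <;> simp [h, ih] <;> omega

theorem insertBy_append_left {α : Type} (p : α → α → Bool) (x : α) (l r : List α)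
    (h : ∀ y ∈ l, p x y = false) :
    PySem.List.insertBy p x (l ++ r) = l ++ PySem.List.insertBy p x r := by
  induction l with
  | nil => simp
  | cons y ys ih =>
      have hy : p x y = false := h y (by simp)
      simp [PySem.List.insertBy, hy]
      exact ih (fun z hz => h z (by simp [hz]))

theorem insertBy_of_forall_before {α : Type} (p : α → α → Bool) (x : α) (r : List α)
    (h : ∀ y ∈ r, p x y = true) :
    PySem.List.insertBy p x r = x :: r := by
  cases r with
  | nil => rfl
  | cons y ys => simp [PySem.List.insertBy, h y (by simp)]

-- inserting x (reverse order, stably) into a concatenation of strictly-descending key buckets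
-- appends x at the end of its own bucket
theorem insertBy_flatMap_buckets {α : Type} (key : α → Int) (x : α) (vals : List Int)
    (bucket : Int → List α)
    (hb : ∀ v ∈ vals, ∀ y ∈ bucket v, key y = v)
    (hd : vals.Pairwise (· > ·)) (hx : key x ∈ vals) :
    PySem.List.insertBy (fun a b => decide (key b < key a)) x (vals.flatMap bucket)
      = vals.flatMap (fun v => if v = key x then bucket v ++ [x] else bucket v) := by
  induction vals with
  | nil => simp at hx
  | cons v vs ih =>
      rw [List.flatMap_cons, List.flatMap_cons]
      rcases List.pairwise_cons.mp hd with ⟨hgt, hd'⟩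
      by_cases hvx : v = key x
      · -- x goes right after bucket v
        have h1 : ∀ y ∈ bucket v, (fun a b => decide (key b < key a)) x y = false := by
          intro y hy
          have := hb v (by simp) y hy
          simp [this, hvx]
        rw [insertBy_append_left _ _ _ _ h1]
        have h2 : ∀ y ∈ vs.flatMap bucket, (fun a b => decide (key b < key a)) x y = true := by
          intro y hy
          rcases List.mem_flatMap.mp hy with ⟨w, hw, hyw⟩
          have hkey := hb w (by simp [hw]) y hyw
          have : w < v := hgt w hw
          simp [hkey]; omega
        rw [insertBy_of_forall_before _ _ _ h2]
        have hvs : ∀ w ∈ vs, ¬ (w = key x) := by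
          intro w hw; have := hgt w hw; omega
        rw [if_pos hvx,
          show List.flatMap (fun w => if w = key x then bucket w ++ [x] else bucket w) vs
              = List.flatMap bucket vs from List.flatMap_congr (fun w hw => if_neg (hvs w hw))]
        simp
      · -- x belongs to a later bucket
        have hx' : key x ∈ vs := by
          rcases List.mem_cons.mp hx with h | h
          · exact absurd h.symm hvx
          · exact h
        have h1 : ∀ y ∈ bucket v, (fun a b => decide (key b < key a)) x y = false := by
          intro y hy
          have hkey := hb v (by simp) y hy
          have : key x < v := hgt _ hx'
          simp [hkey]; omega
        rw [insertBy_append_left _ _ _ _ h1, if_neg hvx,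
          ih (fun w hw y hy => hb w (by simp [hw]) y hy) hd' hx']

-- the stable reverse sort is the concatenation of the key fibers in descending key order
theorem sorted_rev_eq_flatMap {α : Type} (xs : List α) (key : α → Int) (vals : List Int)
    (hd : vals.Pairwise (· > ·)) (hmem : ∀ x ∈ xs, key x ∈ vals) :
    PySem.List.sorted xs key true = vals.flatMap (fun v => xs.filter (fun x => key x == v)) := by
  induction xs using List.reverseRecOn with
  | nil => simp [PySem.List.sorted]
  | append_singleton xs x ih =>
      rw [PySem.List.sorted_rev_eq_foldl_insertBy, List.foldl_append, List.foldl_cons, List.foldl_nil,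
        ← PySem.List.sorted_rev_eq_foldl_insertBy,
        ih (fun y hy => hmem y (by simp [hy]))]
      rw [insertBy_flatMap_buckets key x vals _
        (fun v hv y hy => by
          have := (List.mem_filter.mp hy).2
          exact eq_of_beq this)
        hd (hmem x (by simp))]
      apply List.flatMap_congr
      intro v hv
      rw [List.filter_append]
      by_cases h : key x = v
      · simp [h]
      · have : ¬ (v = key x) := fun hh => h hh.symm
        simp [this, h]

-- A's score is B's bucket index, as an Int
theorem score_eq (job_keywords : List String) (title : String) :
    job_keywords.foldl
      (fun s kw => if PySem.Str.isIn (PySem.Str.lower kw) (PySem.Str.lower title) then s + 1 else s) (0 : Int)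
    = (((job_keywords.map PySem.Str.lower).foldl
        (fun n kw => if PySem.Str.isIn kw (PySem.Str.lower title) then n + 1 else n) (0 : Nat) : Nat) : Int) := by
  rw [foldl_count_nat, ← List.foldl_map (f := PySem.Str.lower)
    (g := fun (s : Int) kw => if PySem.Str.isIn kw (PySem.Str.lower title) then s + 1 else s),
    PySem.List.foldl_if_add_one]
  simp

-- joint loop invariant: B's buckets are the score fibers of A's ranked list
theorem sim_fold (job_keywords : List String) (sections : List (List (String × String)))
    (r : List (Int × List (String × String))) (bk : List (List (List (String × String))))
    (seen : PySem.Set String)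
    (hlen : bk.length = job_keywords.length + 1)
    (hrel : ∀ v : Nat, v ≤ job_keywords.length →
      bk.getD v [] = (r.filter (fun p => p.1 == (v : Int))).map Prod.snd) :
    (sections.foldl (stepB (job_keywords.map PySem.Str.lower)) (bk, seen)).1.length = job_keywords.length + 1 ∧
    ∀ v : Nat, v ≤ job_keywords.length →
      (sections.foldl (stepB (job_keywords.map PySem.Str.lower)) (bk, seen)).1.getD v []
        = ((sections.foldl (stepA job_keywords) (r, seen)).1.filter (fun p => p.1 == (v : Int))).map Prod.snd := by
  induction sections generalizing r bk seen with
  | nil => exact ⟨hlen, hrel⟩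
  | cons sec secs ih =>
      rw [List.foldl_cons, List.foldl_cons]
      set title := (PySem.Dict.get? (⟨sec⟩ : PySem.Dict String String) "section_title").getD "" with htitle
      set n : Nat := (job_keywords.map PySem.Str.lower).foldl
        (fun n kw => if PySem.Str.isIn kw (PySem.Str.lower title) then n + 1 else n) 0 with hn
      by_cases hseen : PySem.Set.contains seen title = true
      · have hB : stepB (job_keywords.map PySem.Str.lower) (bk, seen) sec = (bk, seen) := by
          simp only [stepB]; rw [if_pos hseen]
        have hA : stepA job_keywords (r, seen) sec = (r, seen) := by
          simp only [stepA]; rw [if_pos hseen]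
        rw [hB, hA]
        exact ih r bk seen hlen hrel
      · have hnk : n ≤ job_keywords.length := by
          have h1 : n = (job_keywords.map PySem.Str.lower).countP
              (fun kw => PySem.Str.isIn kw (PySem.Str.lower title)) := by
            rw [hn, foldl_count_nat]; simp
          rw [h1]
          simpa using List.countP_le_length
        have hB : stepB (job_keywords.map PySem.Str.lower) (bk, seen) sec
            = (bk.set n (bk.getD n [] ++ [sec]), PySem.Set.add seen title) := by
          simp only [stepB]; rw [if_neg hseen]
        have hA : stepA job_keywords (r, seen) sec
            = (r ++ [((n : Int), sec)], PySem.Set.add seen title) := by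
          simp only [stepA]; rw [if_neg hseen, score_eq job_keywords title]
        rw [hB, hA]
        refine ih _ _ _ (by simpa using hlen) ?_
        intro v hv
        rw [List.getD_eq_getElem?_getD, List.getElem?_set, List.filter_append]
        by_cases hveq : n = v
        · subst hveq
          rw [if_pos rfl, if_pos (by omega)]
          have hb : ((n : Int) == (n : Int)) = true := by simp
          simp only [List.filter_cons, hb, if_true, List.filter_nil]
          rw [List.map_append, Option.getD_some, hrel n hnk]
          simp
        · rw [if_neg hveq]
          have hb : ((n : Int) == (v : Int)) = false := by simp; omega
          simp only [List.filter_cons, hb, Bool.false_eq_true, if_false, List.filter_nil,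
            List.append_nil]
          rw [← List.getD_eq_getElem?_getD, hrel v hv]

-- every score in A's ranked list is a Nat ≤ len(job_keywords)
theorem ranked_scores (job_keywords : List String) (sections : List (List (String × String)))
    (r : List (Int × List (String × String))) (seen : PySem.Set String)
    (h : ∀ p ∈ r, ∃ m : Nat, m ≤ job_keywords.length ∧ p.1 = (m : Int)) :
    ∀ p ∈ (sections.foldl (stepA job_keywords) (r, seen)).1,
      ∃ m : Nat, m ≤ job_keywords.length ∧ p.1 = (m : Int) := by
  induction sections generalizing r seen with
  | nil => exact h
  | cons sec secs ih =>
      rw [List.foldl_cons]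
      set title := (PySem.Dict.get? (⟨sec⟩ : PySem.Dict String String) "section_title").getD "" with htitle
      set n : Nat := (job_keywords.map PySem.Str.lower).foldl
        (fun n kw => if PySem.Str.isIn kw (PySem.Str.lower title) then n + 1 else n) 0 with hn
      by_cases hseen : PySem.Set.contains seen title = true
      · have hA : stepA job_keywords (r, seen) sec = (r, seen) := by
          simp only [stepA]; rw [if_pos hseen]
        rw [hA]; exact ih r seen h
      · have hA : stepA job_keywords (r, seen) sec
            = (r ++ [((n : Int), sec)], PySem.Set.add seen title) := by
          simp only [stepA]; rw [if_neg hseen, score_eq job_keywords title]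
        rw [hA]
        refine ih _ _ ?_
        intro p hp
        rcases List.mem_append.mp hp with hp | hp
        · exact h p hp
        · have hnk : n ≤ job_keywords.length := by
            have h1 : n = (job_keywords.map PySem.Str.lower).countP
                (fun kw => PySem.Str.isIn kw (PySem.Str.lower title)) := by
              rw [hn, foldl_count_nat]; simp
            rw [h1]
            simpa using List.countP_le_length
          rcases List.mem_singleton.mp hp with rfl
          exact ⟨n, hnk, rfl⟩

-- the two ports agree on every input
theorem rank_sections_eq_alt (sections : List (List (String × String))) (job_keywords : List String) :
    rank_sections sections job_keywords = rank_sections_alt sections job_keywords := by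
  unfold rank_sections rank_sections_alt
  simp only [List.length_map]
  set k := job_keywords.length with hk
  set ranked := (sections.foldl (stepA job_keywords) ([], PySem.Set.empty)).1 with hranked
  set stB := sections.foldl (stepB (job_keywords.map PySem.Str.lower))
      (List.replicate (k + 1) [], PySem.Set.empty) with hstB
  -- joint invariant
  have hsim := sim_fold job_keywords sections [] (List.replicate (k + 1) []) PySem.Set.empty
    (by simp [hk]) (by intro v hv; simp)
  have hscores := ranked_scores job_keywords sections [] PySem.Set.empty (by simp)
  -- the descending value list [k, k-1, …, 0]
  set f : Nat → Int := fun i => ((k - i : Nat) : Int) with hf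
  set vals := (List.range (k + 1)).map f with hvals
  have hd : vals.Pairwise (· > ·) := by
    rw [hvals, List.pairwise_map, List.pairwise_iff_getElem]
    intro i j hi hj hij
    simp only [List.getElem_range] at *
    simp only [hf]
    simp only [List.length_range] at hi hj
    omega
  have hmem : ∀ x ∈ ranked, x.1 ∈ vals := by
    intro x hx
    rcases hscores x hx with ⟨m, hm, heq⟩
    refine List.mem_map.mpr ⟨k - m, List.mem_range.mpr (by omega), ?_⟩
    rw [heq]; simp only [hf]; omega
  rw [sorted_rev_eq_flatMap ranked (fun x => x.1) vals hd hmem]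
  rw [List.filter_flatMap, List.map_flatMap]
  -- split off the score-0 bucket, which the 'item[0] > 0' filter empties
  have hsplit : vals = (List.range k).map f ++ [(0 : Int)] := by
    rw [hvals, show k + 1 = k.succ from rfl, List.range_succ, List.map_append]
    simp [hf]
  rw [hsplit, List.flatMap_append]
  have hzero : (List.filter (fun item => decide (0 < item.1))
      (ranked.filter (fun x => x.1 == (0 : Int)))).map (fun item => item.2) = [] := by
    rw [List.map_eq_nil_iff, List.filter_eq_nil_iff]
    intro a ha
    have := (List.mem_filter.mp ha).2
    have h0 : a.1 = 0 := eq_of_beq this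
    simp [h0]
  rw [show List.flatMap (fun v => (List.filter (fun item => decide (0 < item.1))
        (ranked.filter (fun x => x.1 == v))).map (fun item => item.2)) [(0 : Int)] = [] by
      simp only [List.flatMap_cons, List.flatMap_nil, List.append_nil]; exact hzero,
    List.append_nil]
  -- B's read-out loop is the same concatenation of buckets, high to low
  rw [PySem.List.foldl_append_eq_flatMap, List.nil_append, PySem.List.pyRange_neg_one]
  rw [show (((k : Int) - 0).toNat) = k by omega]
  rw [List.flatMap_map, List.flatMap_map]
  refine congrArg (fun l => PySem.List.slice l none (some 5)) ?_
  apply List.flatMap_congr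
  intro i hi
  have hik : i < k := List.mem_range.mp hi
  have htn : ((k : Int) - (i : Nat)).toNat = k - i := by omega
  rw [htn, hsim.2 (k - i) (by omega)]
  have hpos : List.filter (fun item => decide (0 < item.1))
      (ranked.filter (fun x => x.1 == f i)) = ranked.filter (fun x => x.1 == f i) := by
    rw [List.filter_eq_self]
    intro a ha
    have h1 : a.1 = f i := eq_of_beq (List.mem_filter.mp ha).2
    simp only [hf] at h1
    simp [h1]; omega
  rw [hpos]

-- ===== VERDICT (by name: the statement is the Claim_ definition above) =====
theorem rank_sections_spec : Claim_equal_rank_sections := by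
  intro sections job_keywords _ _
  unfold Spec_rank_sections
  exact rank_sections_eq_alt sections job_keywords
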